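-- pv_equiv track=rewrite | github.com/alvinmurimi/pygsm7 | pygsm7.py | _unpack_septets
-- ===== SOURCE A (Python) =====
-- def _unpack_septets(data, septet_count=None):
--     if septet_count is not None:
--         if not isinstance(septet_count, int):
--             raise TypeError("septet_count must be an integer.")
--         if septet_count < 0:
--             raise ValueError("septet_count must be zero or greater.")
--
--     septets = []
--     buffer_value = 0
--     bit_count = 0
--
--     for octet in data:
--         buffer_value |= octet << bit_count
--         bit_count += 8
--
--         while bit_count >= 7:
--             septets.append(buffer_value & 0x7F)
--             buffer_value >>= 7
--             bit_count -= 7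
--             if septet_count is not None and len(septets) == septet_count:
--                 return septets
--
--     if septet_count is not None and len(septets) != septet_count:
--         raise ValueError("Packed GSM 7-bit payload does not contain %s septets." % septet_count)
--
--     return septets
-- ===== SOURCE B (Python) =====
-- def _unpack_septets(data, septet_count=None):
--     if septet_count is not None:
--         if not isinstance(septet_count, int):
--             raise TypeError("septet_count must be an integer.")
--         if septet_count < 0:
--             raise ValueError("septet_count must be zero or greater.")
--
--     # Single pass: fold every octet into one big integer at its 8-bit slot.
--     value = 0
--     n = 0
--     for octet in data:
--         value |= octet << (8 * n)
--         n += 1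
--
--     # Extract each septet directly by position from the global value.
--     septets = []
--     for i in range(n * 8 // 7):
--         septets.append((value >> (7 * i)) & 0x7F)
--         if septet_count is not None and len(septets) == septet_count:
--             return septets
--
--     if septet_count is not None and len(septets) != septet_count:
--         raise ValueError("Packed GSM 7-bit payload does not contain %s septets." % septet_count)
--
--     return septets
-- ===== Notes on version B (the rewrite author's own statement) =====
-- stated objective: alternative
-- what changed: A interleaves packing and extraction with one rolling buffer/bit-count and a nested while loop; B first folds the whole input into a single big integer in one pass and then extracts each septet i directly as (value >> 7*i) & 0x7F in a separate flat loop over range(n*8//7).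
import Mathlib
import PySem

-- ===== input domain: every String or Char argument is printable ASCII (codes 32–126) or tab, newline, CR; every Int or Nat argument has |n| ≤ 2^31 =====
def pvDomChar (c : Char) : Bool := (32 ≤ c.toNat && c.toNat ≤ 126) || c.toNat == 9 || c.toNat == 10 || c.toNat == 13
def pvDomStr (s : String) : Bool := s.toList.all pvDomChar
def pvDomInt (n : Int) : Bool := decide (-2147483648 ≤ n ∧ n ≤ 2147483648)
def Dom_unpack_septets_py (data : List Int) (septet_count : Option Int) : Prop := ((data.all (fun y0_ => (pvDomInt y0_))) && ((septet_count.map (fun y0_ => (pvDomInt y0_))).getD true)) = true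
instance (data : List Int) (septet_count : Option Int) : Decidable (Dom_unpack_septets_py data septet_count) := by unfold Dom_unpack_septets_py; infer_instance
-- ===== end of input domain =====

-- B replaces A's interleaved rolling-buffer packing/extraction with two flat passes:
-- fold all octets into one big integer, then read each septet off by a direct shift (objective: alternative).

-- ===== PORT A =====
-- inner `while bit_count >= 7` loop; `.inl r` models the early `return septets`,
-- `.inr (septets, buffer_value, bit_count)` the state when the while condition fails
def aWhile (sc : Option Int) (septets : List Int) (buf : Int) (bits : Int) :
    (List Int) ⊕ (List Int × Int × Int) :=
  if h : 7 ≤ bits then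
    let septets' := septets ++ [Int.land buf 127]
    if sc = some (septets'.length : Int) then Sum.inl septets'
    else aWhile sc septets' (buf >>> (7 : Int)) (bits - 7)
  else Sum.inr (septets, buf, bits)
termination_by bits.toNat
decreasing_by omega

-- `for octet in data` loop, propagating the early return
def aFor (sc : Option Int) (septets : List Int) (buf : Int) (bits : Int) :
    List Int → (List Int) ⊕ (List Int × Int × Int)
  | [] => Sum.inr (septets, buf, bits)
  | o :: rest =>
    match aWhile sc septets (Int.lor buf (o <<< bits)) (bits + 8) with
    | Sum.inl r => Sum.inl r
    | Sum.inr (s', b', c') => aFor sc s' b' c' rest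

-- the upfront TypeError cannot occur under the type convention; the upfront ValueError
-- (septet_count < 0) and the final ValueError (length mismatch) raise: excluded by Pre_
def unpack_septets_py (data : List Int) (septet_count : Option Int) : List Int :=
  match aFor septet_count [] 0 0 data with
  | Sum.inl r => r
  | Sum.inr (septets, _, _) => septets

-- ===== PORT B =====
-- first pass of Source B: value |= octet << (8*n); n += 1
def bAccum (v : Int) (n : Int) : List Int → Int × Int
  | [] => (v, n)
  | o :: rest => bAccum (Int.lor v (o <<< (8 * n))) (n + 1) rest

-- second pass of Source B: append (value >> 7*i) & 0x7F for i in range(n*8//7), with the early return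
def bExtract (sc : Option Int) (v : Int) (septets : List Int) : List Int → List Int
  | [] => septets
  | i :: rest =>
    let septets' := septets ++ [Int.land (v >>> (7 * i)) 127]
    if sc = some (septets'.length : Int) then septets'
    else bExtract sc v septets' rest

-- Source B raises exactly where Source A does (same guards); those inputs are excluded by Pre_
def unpack_septets_py_alt (data : List Int) (septet_count : Option Int) : List Int :=
  let vn := bAccum 0 0 data
  bExtract septet_count vn.1 [] (PySem.List.pyRange 0 (PySem.Int.floordiv (vn.2 * 8) 7) 1)

-- ===== PRECONDITION & SPEC =====
-- Pre_ excludes exactly the inputs on which Python A raises (and B raises identically):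
-- septet_count < 0 (upfront ValueError) and septet_count values the data cannot supply
-- (final ValueError / no early return) — A never returns a value outside Pre_.
def Pre_unpack_septets_py (data : List Int) (septet_count : Option Int) : Prop :=
  (match septet_count with
   | none => true
   | some c => decide ((c = 0 ∧ data = []) ∨ (1 ≤ c ∧ 7 * c ≤ 8 * (data.length : Int)))) = true
instance (data : List Int) (septet_count : Option Int) : Decidable (Pre_unpack_septets_py data septet_count) := by unfold Pre_unpack_septets_py; infer_instance

def pvWitness_unpack_septets_py : List Int × Option Int := ([214, 249, 27], some 3)

def Spec_unpack_septets_py (data : List Int) (septet_count : Option Int) (out : List Int) : Prop := out = unpack_septets_py_alt data septet_count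
instance (data : List Int) (septet_count : Option Int) (out : List Int) : Decidable (Spec_unpack_septets_py data septet_count out) := by unfold Spec_unpack_septets_py; infer_instance

-- ===== CLAIM (what is proved, stated in full; the proofs are below) =====
def Claim_equal_unpack_septets_py : Prop := ∀ (data : List Int) (septet_count : Option Int), Dom_unpack_septets_py data septet_count → Pre_unpack_septets_py data septet_count → Spec_unpack_septets_py data septet_count (unpack_septets_py data septet_count)

-- ===== LEMMAS AND PROOFS =====

theorem pvInt_ext {x y : Int} (h : ∀ i : ℕ, Int.testBit x i = Int.testBit y i) : x = y := by
  match x, y with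
  | Int.ofNat a, Int.ofNat b =>
    exact congrArg Int.ofNat (Nat.eq_of_testBit_eq (fun i => h i))
  | Int.negSucc a, Int.negSucc b =>
    refine congrArg Int.negSucc (Nat.eq_of_testBit_eq (fun i => ?_))
    have := h i
    simp only [Int.testBit] at this
    exact Bool.not_inj this
  | Int.ofNat a, Int.negSucc b =>
    exfalso
    have ha : Nat.testBit a (a + b) = false := Nat.testBit_lt_two_pow (by
      calc a ≤ a + b := Nat.le_add_right _ _
        _ < 2 ^ (a + b) := Nat.lt_two_pow_self)
    have hb : Nat.testBit b (a + b) = false := Nat.testBit_lt_two_pow (by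
      calc b ≤ a + b := Nat.le_add_left _ _
        _ < 2 ^ (a + b) := Nat.lt_two_pow_self)
    have := h (a + b)
    simp only [Int.testBit, ha, hb] at this
    simp at this
  | Int.negSucc a, Int.ofNat b =>
    exfalso
    have ha : Nat.testBit a (a + b) = false := Nat.testBit_lt_two_pow (by
      calc a ≤ a + b := Nat.le_add_right _ _
        _ < 2 ^ (a + b) := Nat.lt_two_pow_self)
    have hb : Nat.testBit b (a + b) = false := Nat.testBit_lt_two_pow (by
      calc b ≤ a + b := Nat.le_add_left _ _
        _ < 2 ^ (a + b) := Nat.lt_two_pow_self)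
    have := h (a + b)
    simp only [Int.testBit, ha, hb] at this
    simp at this

theorem pvShiftLeft'_true_testBit (m k i : ℕ) :
    (Nat.shiftLeft' true m k).testBit i = if i < k then true else m.testBit (i - k) := by
  have hv : 1 ≤ 2 ^ k := Nat.one_le_two_pow
  have h1 : Nat.shiftLeft' true m k + 1 = (m + 1) * 2 ^ k := Nat.shiftLeft'_true_eq_mul_pow m k
  have h2 : (m + 1) * 2 ^ k = 2 ^ k * m + 2 ^ k := by ring
  have h3 : Nat.shiftLeft' true m k = 2 ^ k * m + (2 ^ k - 1) := by omega
  rw [h3, Nat.testBit_two_pow_mul_add m (by omega) i]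
  by_cases hik : i < k
  · simp [hik, Nat.testBit_two_pow_sub_one]
  · simp [hik]

theorem pvTb_shiftLeft (x : Int) (k i : ℕ) :
    Int.testBit (x <<< ((k : ℕ) : Int)) i = (decide (k ≤ i) && Int.testBit x (i - k)) := by
  match x with
  | Int.ofNat m =>
    have : (Int.ofNat m) <<< ((k : ℕ) : Int) = Int.ofNat (m <<< k) := Int.shiftLeft_natCast m k
    rw [this]
    simp only [Int.testBit]
    rw [Nat.testBit_shiftLeft]
  | Int.negSucc m =>
    have : (Int.negSucc m) <<< ((k : ℕ) : Int) = Int.negSucc (Nat.shiftLeft' true m k) :=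
      Int.shiftLeft_negSucc m k
    rw [this]
    simp only [Int.testBit, pvShiftLeft'_true_testBit]
    by_cases hik : k ≤ i
    · simp [hik, Nat.not_lt.mpr hik]
    · simp [hik, Nat.lt_of_not_le hik]

theorem pvTb_shiftRight (x : Int) (k i : ℕ) :
    Int.testBit (x >>> ((k : ℕ) : Int)) i = Int.testBit x (i + k) := by
  match x with
  | Int.ofNat m =>
    have : (Int.ofNat m) >>> ((k : ℕ) : Int) = Int.ofNat (m >>> k) := Int.shiftRight_natCast m k
    rw [this]
    simp only [Int.testBit]
    rw [Nat.testBit_shiftRight, Nat.add_comm]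
  | Int.negSucc m =>
    have : (Int.negSucc m) >>> ((k : ℕ) : Int) = Int.negSucc (m >>> k) :=
      Int.shiftRight_negSucc m k
    rw [this]
    simp only [Int.testBit]
    rw [Nat.testBit_shiftRight, Nat.add_comm]

theorem pvTb_127 (i : ℕ) : Int.testBit (127 : Int) i = decide (i < 7) := by
  have : (127 : Int) = Int.ofNat 127 := rfl
  rw [this]
  simp only [Int.testBit]
  have : (127 : ℕ) = 2 ^ 7 - 1 := by norm_num
  rw [this, Nat.testBit_two_pow_sub_one]

def orShift (v : Int) (k : Int) : List Int → Int
  | [] => v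
  | o :: rest => orShift (Int.lor v (o <<< k)) (k + 8) rest
def septList (V : Int) (n : ℕ) : List Int :=
  (List.range n).map (fun t => Int.land (V >>> ((7 * t : ℕ) : Int)) 127)
theorem pvSeptList_succ (V : Int) (n : ℕ) :
    septList V (n + 1) = septList V n ++ [Int.land (V >>> ((7 * n : ℕ) : Int)) 127] := by
  simp [septList, List.range_succ]
theorem pvSeptList_length (V : Int) (n : ℕ) : (septList V n).length = n := by
  simp [septList]

theorem pvSeptet_agree {v w : Int} {B : ℕ}
    (h : ∀ i : ℕ, i < B → Int.testBit v i = Int.testBit w i) (t : ℕ) (ht : 7 * t + 7 ≤ B) :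
    Int.land (v >>> ((7 * t : ℕ) : Int)) 127 = Int.land (w >>> ((7 * t : ℕ) : Int)) 127 := by
  apply pvInt_ext (fun i => ?_)
  rw [Int.testBit_land, Int.testBit_land, pvTb_shiftRight, pvTb_shiftRight, pvTb_127]
  by_cases hi : i < 7
  · rw [h (i + 7 * t) (by omega)]
  · simp [hi]

theorem pvOrShift_low (xs : List Int) : ∀ (v : Int) (k : Int), ∀ i : ℕ, (i : Int) < k →
    Int.testBit (orShift v k xs) i = Int.testBit v i := by
  induction xs with
  | nil => intro v k i hik; rfl
  | cons o rest ih =>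
    intro v k i hik
    have hk0 : 0 ≤ k := le_trans (Int.natCast_nonneg i) (le_of_lt hik)
    rw [orShift, ih _ _ i (by omega)]
    rw [Int.testBit_lor]
    have hk : k = ((k.toNat : ℕ) : Int) := by omega
    rw [hk, pvTb_shiftLeft]
    have : ¬ (k.toNat ≤ i) := by omega
    simp [this]

theorem pvLor_shift (w o : Int) (s : ℕ) (b : Int) (hb : 0 ≤ b) :
    Int.lor (w >>> ((7 * s : ℕ) : Int)) (o <<< b) =
      (Int.lor w (o <<< (((7 * s : ℕ) : Int) + b))) >>> ((7 * s : ℕ) : Int) := by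
  apply pvInt_ext (fun i => ?_)
  have hb' : b = ((b.toNat : ℕ) : Int) := by omega
  have hsum : ((7 * s : ℕ) : Int) + b = (((7 * s + b.toNat : ℕ) : ℕ) : Int) := by push_cast; omega
  rw [hsum, hb', pvTb_shiftRight, Int.testBit_lor, Int.testBit_lor, pvTb_shiftRight,
    pvTb_shiftLeft, pvTb_shiftLeft]
  congr 1
  by_cases hbi : b.toNat ≤ i
  · have h3 : i + 7 * s - (7 * s + b.toNat) = i - b.toNat := by omega
    have h2 : 7 * s + b.toNat ≤ i + 7 * s := by omega
    simp only [Int.toNat_natCast, h3, hbi, h2, decide_true, Bool.true_and]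
  · have h2 : ¬ (7 * s + b.toNat ≤ i + 7 * s) := by omega
    simp only [Int.toNat_natCast, h2, hbi, decide_false, Bool.false_and]

theorem pvShiftRight_step (w : Int) (s : ℕ) :
    (w >>> ((7 * s : ℕ) : Int)) >>> (7 : Int) = w >>> ((7 * (s + 1) : ℕ) : Int) := by
  apply pvInt_ext (fun i => ?_)
  have h7 : (7 : Int) = ((7 : ℕ) : Int) := rfl
  rw [h7, pvTb_shiftRight, pvTb_shiftRight, pvTb_shiftRight]
  congr 1
  omega

theorem pvAWhile_eq (n : ℕ) : ∀ (sc : Option Int) (V w : Int) (s : ℕ) (bits : Int),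
    bits.toNat = n → 0 ≤ bits →
    (∀ c, sc = some c → (s : Int) < c) →
    (∀ i : ℕ, i < 7 * s + bits.toNat → Int.testBit w i = Int.testBit V i) →
    aWhile sc (septList V s) (w >>> ((7 * s : ℕ) : Int)) bits =
      (match sc with
       | none => Sum.inr (septList V (s + bits.toNat / 7),
                          w >>> ((7 * (s + bits.toNat / 7) : ℕ) : Int), bits - 7 * ((bits.toNat / 7 : ℕ) : Int))
       | some c => if c ≤ ((s + bits.toNat / 7 : ℕ) : Int) then Sum.inl (septList V c.toNat)
                   else Sum.inr (septList V (s + bits.toNat / 7),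
                          w >>> ((7 * (s + bits.toNat / 7) : ℕ) : Int), bits - 7 * ((bits.toNat / 7 : ℕ) : Int))) := by
  induction n using Nat.strong_induction_on with
  | _ n ih =>
    intro sc V w s bits hn h0 hcut hlow
    rw [aWhile]
    by_cases h7 : 7 ≤ bits
    · rw [dif_pos h7]
      have hsep : Int.land (w >>> ((7 * s : ℕ) : Int)) 127 = Int.land (V >>> ((7 * s : ℕ) : Int)) 127 :=
        pvSeptet_agree hlow s (by omega)
      have hsep' : septList V s ++ [Int.land (w >>> ((7 * s : ℕ) : Int)) 127] = septList V (s + 1) := by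
        rw [hsep, pvSeptList_succ]
      have hlen : (septList V s ++ [Int.land (w >>> ((7 * s : ℕ) : Int)) 127]).length = s + 1 := by
        rw [hsep']; exact pvSeptList_length V (s + 1)
      have e1 : s + 1 + (bits - 7).toNat / 7 = s + bits.toNat / 7 := by omega
      have e2 : bits - 7 - 7 * (((bits - 7).toNat / 7 : ℕ) : Int) = bits - 7 * ((bits.toNat / 7 : ℕ) : Int) := by
        push_cast; omega
      match sc with
      | none =>
        rw [if_neg (by simp), hsep', pvShiftRight_step]
        have hrec := ih (bits - 7).toNat (by omega) none V w (s + 1) (bits - 7) rfl (by omega)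
          (by intro c hc; exact absurd hc (by simp))
          (by intro i hi; exact hlow i (by omega))
        rw [hrec]
        dsimp only
        rw [e1, e2]
      | some c =>
        by_cases hret : c = ((s + 1 : ℕ) : Int)
        · rw [if_pos (by rw [hlen, hret]), hsep']
          dsimp only
          rw [if_pos (by rw [hret]; push_cast; omega)]
          simp only [hret, Int.toNat_natCast]
        · rw [if_neg (by rw [hlen]; intro he; exact hret (Option.some.inj he)), hsep', pvShiftRight_step]
          have hrec := ih (bits - 7).toNat (by omega) (some c) V w (s + 1) (bits - 7) rfl (by omega)
            (by intro c' hc'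
                have h1 := hcut c' hc'
                have h2 := Option.some.inj hc'
                subst h2
                have h3 : ¬ ((c : Int) = ((s + 1 : ℕ) : Int)) := hret
                push_cast at h3 ⊢; omega)
            (by intro i hi; exact hlow i (by omega))
          rw [hrec]
          dsimp only
          rw [e1, e2]
    · rw [dif_neg h7]
      have hb7 : bits.toNat / 7 = 0 := by omega
      have hadd : s + bits.toNat / 7 = s := by omega
      have hbits : bits - 7 * ((bits.toNat / 7 : ℕ) : Int) = bits := by rw [hb7]; simp
      match sc with
      | none =>
        dsimp only
        rw [hadd, hbits]
      | some c =>
        dsimp only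
        rw [if_neg (by have := hcut c rfl; rw [hadd]; omega), hadd, hbits]

def outSeptets : (List Int) ⊕ (List Int × Int × Int) → List Int
  | Sum.inl r => r
  | Sum.inr (s, _, _) => s

theorem pvAFor_out (rest : List Int) : ∀ (sc : Option Int) (w : Int) (s : ℕ) (bits : Int),
    0 ≤ bits → bits < 7 →
    (∀ c, sc = some c → (s : Int) < c) →
    outSeptets (aFor sc (septList (orShift w ((7 * s + bits.toNat : ℕ) : Int) rest) s)
        (w >>> ((7 * s : ℕ) : Int)) bits rest) =
      (let V := orShift w ((7 * s + bits.toNat : ℕ) : Int) rest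
       let Tf := s + (bits.toNat + 8 * rest.length) / 7
       match sc with
       | none => septList V Tf
       | some c => if c ≤ (Tf : Int) then septList V c.toNat else septList V Tf) := by
  induction rest with
  | nil =>
    intro sc w s bits h0 h7 hcut
    dsimp only [aFor, orShift, outSeptets, List.length_nil]
    have hTf : s + (bits.toNat + 8 * 0) / 7 = s := by omega
    rw [hTf]
    match sc with
    | none => rfl
    | some c =>
      dsimp only
      rw [if_neg (by have := hcut c rfl; omega)]
  | cons o rest' ih =>
    intro sc w s bits h0 h7 hcut
    set V := orShift w ((7 * s + bits.toNat : ℕ) : Int) (o :: rest') with hV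
    dsimp only [aFor]
    -- re-align the OR onto the unshifted accumulator
    have hb : bits = ((bits.toNat : ℕ) : Int) := by omega
    have halign : Int.lor (w >>> ((7 * s : ℕ) : Int)) (o <<< bits) =
        (Int.lor w (o <<< ((7 * s + bits.toNat : ℕ) : Int))) >>> ((7 * s : ℕ) : Int) := by
      conv_lhs => rw [hb]
      rw [pvLor_shift w o s ((bits.toNat : ℕ) : Int) (by omega)]
      have hc : ((7 * s : ℕ) : Int) + ((bits.toNat : ℕ) : Int) = ((7 * s + bits.toNat : ℕ) : Int) := by
        push_cast; ring
      rw [hc]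
    have hVrec : V = orShift (Int.lor w (o <<< ((7 * s + bits.toNat : ℕ) : Int)))
        (((7 * s + bits.toNat : ℕ) : Int) + 8) rest' := by rw [hV, orShift]
    set w' := Int.lor w (o <<< ((7 * s + bits.toNat : ℕ) : Int)) with hw'
    have hk8 : (((7 * s + bits.toNat : ℕ) : Int) + 8) = ((7 * s + (bits + 8).toNat : ℕ) : Int) := by
      push_cast; omega
    have hlow : ∀ i : ℕ, i < 7 * s + (bits + 8).toNat → Int.testBit w' i = Int.testBit V i := by
      intro i hi
      rw [hVrec, pvOrShift_low rest' _ _ i (by rw [hk8] at *; push_cast at *; omega)]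
    have hwhile := pvAWhile_eq (bits + 8).toNat sc V w' s (bits + 8) rfl (by omega) hcut hlow
    rw [halign, hwhile]
    have hVrec' : V = orShift w' ((7 * s + (bits + 8).toNat : ℕ) : Int) rest' := by
      rw [hVrec, hk8]
    set e := (bits + 8).toNat / 7 with he
    have he1 : 1 ≤ e := by omega
    have hTf : s + (bits.toNat + 8 * (o :: rest').length) / 7
        = (s + e) + ((bits + 8 - 7 * (e : ℕ)).toNat + 8 * rest'.length) / 7 := by
      simp only [List.length_cons]
      omega
    match sc with
    | none =>
      dsimp only
      have hrec := ih none w' (s + e) (bits + 8 - 7 * (e : ℕ)) (by omega) (by omega)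
        (by intro c hc; exact absurd hc (by simp))
      have hkeq : (7 * (s + e) + (bits + 8 - 7 * (e : ℕ)).toNat : ℕ) = (7 * s + (bits + 8).toNat : ℕ) := by
        omega
      rw [hkeq] at hrec
      rw [← hVrec'] at hrec
      rw [hrec]
      dsimp only
      rw [hTf]
    | some c =>
      dsimp only
      by_cases hce : c ≤ ((s + e : ℕ) : Int)
      · rw [if_pos hce]
        dsimp only [outSeptets]
        rw [if_pos (by rw [hTf]; push_cast at hce ⊢; omega)]
      · rw [if_neg hce]
        have hrec := ih (some c) w' (s + e) (bits + 8 - 7 * (e : ℕ)) (by omega) (by omega)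
          (by intro c' hc'; cases hc'; push_cast at hce ⊢; omega)
        have hkeq : (7 * (s + e) + (bits + 8 - 7 * (e : ℕ)).toNat : ℕ) = (7 * s + (bits + 8).toNat : ℕ) := by
          omega
        rw [hkeq] at hrec
        rw [← hVrec'] at hrec
        rw [hrec]
        dsimp only
        rw [hTf]

theorem pvBAccum_eq (xs : List Int) : ∀ (v : Int) (n : Int),
    bAccum v n xs = (orShift v (8 * n) xs, n + xs.length) := by
  induction xs with
  | nil => intro v n; simp [bAccum, orShift]
  | cons o rest ih =>
    intro v n
    rw [bAccum, orShift, ih]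
    have h1 : 8 * n + 8 = 8 * (n + 1) := by ring
    rw [h1]
    simp [List.length_cons]
    ring

theorem pvBExtract_eq (d : ℕ) : ∀ (T s : ℕ) (sc : Option Int) (V : Int),
    T - s = d → s ≤ T →
    (∀ c, sc = some c → (s : Int) < c) →
    bExtract sc V (septList V s) (PySem.List.pyRange (s : Int) (T : Int) 1) =
      (match sc with
       | none => septList V T
       | some c => if c ≤ (T : Int) then septList V c.toNat else septList V T) := by
  induction d with
  | zero =>
    intro T s sc V hd hst hcut
    have hTs : T = s := by omega
    subst hTs
    rw [PySem.List.pyRange_one_eq_nil (le_of_eq (by omega)), bExtract]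
    match sc with
    | none => rfl
    | some c =>
      dsimp only
      rw [if_neg (by have := hcut c rfl; omega)]
  | succ d ih =>
    intro T s sc V hd hst hcut
    have hlt : (s : Int) < (T : Int) := by omega
    rw [PySem.List.pyRange_one_cons hlt, bExtract]
    have hsept : Int.land (V >>> (7 * (s : Int))) 127 = Int.land (V >>> ((7 * s : ℕ) : Int)) 127 := by
      norm_num
    have hsep' : septList V s ++ [Int.land (V >>> (7 * (s : Int))) 127] = septList V (s + 1) := by
      rw [hsept, pvSeptList_succ]
    have hlen : (septList V s ++ [Int.land (V >>> (7 * (s : Int))) 127]).length = s + 1 := by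
      rw [hsep']; exact pvSeptList_length V (s + 1)
    match sc with
    | none =>
      rw [if_neg (by simp), hsep']
      have hs1 : ((s : Int) + 1) = ((s + 1 : ℕ) : Int) := by push_cast; ring
      rw [hs1]
      exact ih T (s + 1) none V (by omega) (by omega) (by intro c hc; exact absurd hc (by simp))
    | some c =>
      dsimp only
      by_cases hret : c = ((s + 1 : ℕ) : Int)
      · rw [if_pos (by rw [hlen, hret]), hsep']
        rw [if_pos (by rw [hret]; push_cast; omega)]
        simp only [hret, Int.toNat_natCast]
      · rw [if_neg (by rw [hlen]; intro he; exact hret (Option.some.inj he)), hsep']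
        have hs1 : ((s : Int) + 1) = ((s + 1 : ℕ) : Int) := by push_cast; ring
        rw [hs1]
        exact ih T (s + 1) (some c) V (by omega) (by omega)
          (by intro c' hc'; cases hc'; have := hcut c rfl
              have h3 : ¬ ((c : Int) = ((s + 1 : ℕ) : Int)) := hret
              push_cast at h3 ⊢; omega)

theorem pvSeptList_zero (V : Int) : septList V 0 = [] := rfl
theorem pvZero_shift : (0 : Int) >>> (0 : Int) = 0 := by decide

theorem pvMain (data : List Int) (sc : Option Int)
    (hcut : ∀ c, sc = some c → (0 : Int) < c) :
    unpack_septets_py data sc = unpack_septets_py_alt data sc := by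
  have hAout : unpack_septets_py data sc = outSeptets (aFor sc [] 0 0 data) := by
    unfold unpack_septets_py outSeptets
    cases aFor sc [] 0 0 data with
    | inl r => rfl
    | inr t => obtain ⟨a, b, c⟩ := t; rfl
  have hA := pvAFor_out data sc 0 0 0 le_rfl (by norm_num) (by intro c hc; exact hcut c hc)
  simp only [Nat.mul_zero, Int.toNat_zero, Nat.add_zero, Nat.zero_add, Nat.cast_zero,
    pvSeptList_zero, pvZero_shift] at hA
  rw [hAout, hA]
  -- B side
  have hB : bAccum 0 0 data = (orShift 0 0 data, (data.length : Int)) := by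
    rw [pvBAccum_eq]
    norm_num
  unfold unpack_septets_py_alt
  rw [hB]
  have hfd : PySem.Int.floordiv ((data.length : Int) * 8) 7 = ((data.length * 8 / 7 : ℕ) : Int) := by
    have : ((data.length : Int) * 8) = ((data.length * 8 : ℕ) : Int) := by push_cast; ring
    rw [this]
    exact_mod_cast PySem.Int.floordiv_natCast (data.length * 8) 7
  simp only [hfd]
  have hBx := pvBExtract_eq (data.length * 8 / 7) (data.length * 8 / 7) 0 sc (orShift 0 0 data)
    rfl (by omega) (by intro c hc; exact hcut c hc)
  simp only [Nat.cast_zero, pvSeptList_zero] at hBx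
  rw [hBx]
  have hT : data.length * 8 / 7 = 8 * data.length / 7 := by omega
  rw [hT]

-- ===== VERDICT (by name: the statement is the Claim_ definition above) =====
theorem unpack_septets_py_spec : Claim_equal_unpack_septets_py := by
  intro data sc _hdom hpre
  unfold Spec_unpack_septets_py
  match sc with
  | none => exact pvMain data none (by intro c hc; exact absurd hc (by simp))
  | some c =>
    unfold Pre_unpack_septets_py at hpre
    simp only [decide_eq_true_eq] at hpre
    rcases hpre with ⟨hc0, hdata⟩ | ⟨h1, _h2⟩
    · subst hc0; subst hdata; rfl
    · exact pvMain data (some c) (by intro c' hc'; cases hc'; omega)
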